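-- pv_equiv track=rewrite | github.com/cube-creative/jeanpaulstart | jeanpaulstart/tags.py | _load_user_tags_dict
-- ===== SOURCE A (Python) =====
-- def _load_user_tags_dict(tags_content):
--     user_tags_dict = dict()
--     for tag, user_list in tags_content.items():
--         for user in user_list:
--             user = user.lower()
--             if user not in user_tags_dict.keys():
--                 user_tags_dict[user] = list()
--
--             user_tags_dict[user].append(tag)
--             user_tags_dict[user].sort()
--
--     return user_tags_dict
-- ===== SOURCE B (Python) =====
-- def _load_user_tags_dict(tags_content):
--     users = list(dict.fromkeys(
--         user.lower() for user_list in tags_content.values() for user in user_list))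
--     collected = {}
--     for tag, user_list in sorted(tags_content.items(), key=lambda p: p[0]):
--         for user in user_list:
--             collected.setdefault(user.lower(), []).append(tag)
--     return {u: collected[u] for u in users}
-- ===== Notes on version B (the rewrite author's own statement) =====
-- stated objective: faster
-- what changed: A builds the dict incrementally, appending and re-sorting a user's tag list after every single append; B never sorts a value list: it sorts the tag keys once, populates every user's list in one flat pass (processing tags alphabetically leaves each list already sorted), and lists users in first-appearance order as A's dict does.
import Mathlib
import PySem

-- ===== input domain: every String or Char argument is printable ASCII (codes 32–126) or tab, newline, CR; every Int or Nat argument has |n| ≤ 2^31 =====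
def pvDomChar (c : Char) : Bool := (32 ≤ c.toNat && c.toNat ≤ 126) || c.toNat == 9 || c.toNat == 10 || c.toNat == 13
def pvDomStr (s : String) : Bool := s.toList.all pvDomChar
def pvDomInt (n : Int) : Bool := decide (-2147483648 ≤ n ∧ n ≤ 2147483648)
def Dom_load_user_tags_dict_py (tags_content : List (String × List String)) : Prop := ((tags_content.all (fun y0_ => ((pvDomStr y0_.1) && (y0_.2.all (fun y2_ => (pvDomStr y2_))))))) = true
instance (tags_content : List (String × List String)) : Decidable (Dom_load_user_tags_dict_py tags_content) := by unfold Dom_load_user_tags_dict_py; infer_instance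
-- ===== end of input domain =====

-- B never sorts a user's tag list: it sorts the tag keys once and populates each user's list in one flat pass (already in order), listing users in first-appearance order as A's dict does.


-- ===== PORT A =====
-- body of A's inner loop: 'if user not in keys: d[user] = [] ; d[user].append(tag) ; d[user].sort()'
def pvStepA (d : PySem.Dict String (List String)) (u tag : String) : PySem.Dict String (List String) :=
  let d1 := if d.contains u then d else d.insert u []
  d1.insert u (PySem.List.sorted (d1.getD u [] ++ [tag]) (fun x => x) false)

def load_user_tags_dict_py (tags_content : List (String × List String)) : List (String × List String) :=
  ((PySem.Dict.ofList tags_content).items.foldl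
    (fun d p => p.2.foldl (fun d user => pvStepA d (PySem.Str.lower user) p.1) d)
    (PySem.Dict.empty : PySem.Dict String (List String))).items

-- ===== PORT B =====
-- 'users = list(dict.fromkeys(user.lower() for user_list in tags_content.values() for user in user_list))'
def pvUsersB (items : List (String × List String)) : List String :=
  PySem.List.dedup (items.flatMap (fun p => p.2.map PySem.Str.lower))

-- second pass: 'for tag, user_list in sorted(tags_content.items(), key=lambda p: p[0]): for user in user_list: collected.setdefault(user.lower(), []).append(tag)'
def pvCollectB (items : List (String × List String)) : PySem.Dict String (List String) :=
  (PySem.List.sorted items (fun p => p.1) false).foldl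
    (fun d p => p.2.foldl
      (fun d user => d.modify (PySem.Str.lower user) [] (· ++ [p.1])) d)
    (PySem.Dict.empty : PySem.Dict String (List String))

-- the comprehension '{u: collected[u] for u in users}': keys 'users' are distinct by construction and
-- every u in users is a key of collected (same pairs were traversed), so collected[u] is getD u []
def load_user_tags_dict_py_alt (tags_content : List (String × List String)) : List (String × List String) :=
  (pvUsersB (PySem.Dict.ofList tags_content).items).map (fun u =>
    (u, (pvCollectB (PySem.Dict.ofList tags_content).items).getD u []))

-- ===== PRECONDITION & SPEC =====
def Spec_load_user_tags_dict_py (tags_content : List (String × List String)) (out : List (String × List String)) : Prop := out = load_user_tags_dict_py_alt tags_content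
instance (tags_content : List (String × List String)) (out : List (String × List String)) : Decidable (Spec_load_user_tags_dict_py tags_content out) := by unfold Spec_load_user_tags_dict_py; infer_instance

-- ===== CLAIM (what is proved, stated in full; the proofs are below) =====
def Claim_equal_load_user_tags_dict_py : Prop := ∀ (tags_content : List (String × List String)), Dom_load_user_tags_dict_py tags_content → Spec_load_user_tags_dict_py tags_content (load_user_tags_dict_py tags_content)

-- ===== LEMMAS AND PROOFS =====

-- the flattened (tag, lowercased user) pairs both programs effectively traverse
def pvPairs (items : List (String × List String)) : List (String × String) :=
  items.flatMap (fun p => p.2.map (fun user => (p.1, PySem.Str.lower user)))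

-- generic flattening of the nested loops into one fold over pvPairs
theorem pvFlatten {σ : Type} (f : σ → String → String → σ) :
    ∀ (items : List (String × List String)) (init : σ),
      items.foldl (fun d p => p.2.foldl (fun d user => f d (PySem.Str.lower user) p.1) d) init
        = (pvPairs items).foldl (fun d q => f d q.2 q.1) init := by
  intro items
  induction items with
  | nil => intro init; rfl
  | cons x xs ih =>
    intro init
    simp only [pvPairs, List.flatMap_cons, List.foldl_cons, List.foldl_append, List.foldl_map]
    exact ih _

def pvSortL (l : List String) : List String := PySem.List.sorted l (fun x => x) false

def pvDD (L : List (String × String)) : List String :=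
  L.foldl (fun acc q => if acc.contains q.2 then acc else acc ++ [q.2]) []

def pvVal (L : List (String × String)) (u : String) : List String :=
  pvSortL ((L.filter (fun q => q.2 == u)).map (·.1))

def pvCanon (L : List (String × String)) : PySem.Dict String (List String) :=
  PySem.Dict.mk ((pvDD L).map (fun u => (u, pvVal L u)))

theorem pvFind_self (l : List String) (u : String) :
    l.find? (fun x => x == u) = if u ∈ l then some u else none := by
  induction l with
  | nil => rfl
  | cons x xs ih =>
    by_cases h : x = u
    · simp [h]
    · have h' : ¬ u = x := fun e => h e.symm
      simp [h, h', ih]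

theorem pvMem_dd_aux (L : List (String × String)) :
    ∀ (acc : List String) (x : String),
      x ∈ L.foldl (fun acc q => if acc.contains q.2 then acc else acc ++ [q.2]) acc
        ↔ x ∈ acc ∨ ∃ q ∈ L, q.2 = x := by
  induction L with
  | nil => simp
  | cons q L ih =>
    intro acc x
    simp only [List.foldl_cons]
    by_cases h : acc.contains q.2
    · rw [if_pos h, ih]
      constructor
      · rintro (hx | hx)
        · exact Or.inl hx
        · exact Or.inr ⟨_, List.mem_cons_of_mem _ hx.choose_spec.1, hx.choose_spec.2⟩
      · rintro (hx | ⟨r, hr, hrx⟩)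
        · exact Or.inl hx
        · rcases List.mem_cons.mp hr with h1 | h1
          · subst h1; exact Or.inl (hrx ▸ (List.contains_iff_mem.mp h))
          · exact Or.inr ⟨r, h1, hrx⟩
    · rw [if_neg h, ih]
      simp only [List.mem_append, List.mem_singleton]
      constructor
      · rintro ((hx | hx) | hx)
        · exact Or.inl hx
        · exact Or.inr ⟨q, List.mem_cons_self, hx.symm⟩
        · exact Or.inr ⟨_, List.mem_cons_of_mem _ hx.choose_spec.1, hx.choose_spec.2⟩
      · rintro (hx | ⟨r, hr, hrx⟩)
        · exact Or.inl (Or.inl hx)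
        · rcases List.mem_cons.mp hr with h1 | h1
          · subst h1; exact Or.inl (Or.inr hrx.symm)
          · exact Or.inr ⟨r, h1, hrx⟩

theorem pvMem_dd (L : List (String × String)) (x : String) :
    x ∈ pvDD L ↔ ∃ q ∈ L, q.2 = x := by
  rw [pvDD, pvMem_dd_aux]; simp

theorem pvDD_append (L : List (String × String)) (q : String × String) :
    pvDD (L ++ [q]) = if (pvDD L).contains q.2 then pvDD L else pvDD L ++ [q.2] := by
  simp [pvDD, List.foldl_append]

theorem pvContains_canon (L : List (String × String)) (u : String) :
    (pvCanon L).contains u = (pvDD L).contains u := by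
  simp only [pvCanon, PySem.Dict.contains, List.any_map, Function.comp_def]
  rw [Bool.eq_iff_iff]
  simp [List.any_eq_true]

theorem pvGetD_canon (L : List (String × String)) (u : String) :
    (pvCanon L).getD u [] = if u ∈ pvDD L then pvVal L u else [] := by
  simp only [pvCanon, PySem.Dict.getD, PySem.Dict.get?, List.find?_map,
    Function.comp_def]
  rw [show (fun x => (x, pvVal L x).1 == u) = (fun x => x == u) from rfl, pvFind_self]
  by_cases h : u ∈ pvDD L <;> simp [h]

theorem pvSortL_idem_append (l : List String) (t : String) :
    pvSortL (pvSortL l ++ [t]) = pvSortL (l ++ [t]) := by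
  unfold pvSortL
  exact (PySem.List.sorted_id_eq_sorted_id_iff_perm _ _).mpr
    ((PySem.List.sorted_perm l (fun x => x) false).append_right [t])

theorem pvVal_append (L : List (String × String)) (t u u' : String) :
    pvVal (L ++ [(t, u)]) u'
      = if u' = u then pvSortL ((L.filter (fun q => q.2 == u')).map (·.1) ++ [t]) else pvVal L u' := by
  unfold pvVal
  by_cases h : u' = u
  · subst h; simp
  · have h' : (u == u') = false := by simp; exact fun e => h e.symm
    simp [List.filter_append, h', h]

theorem pvStep_canon (L : List (String × String)) (t u : String) :
    pvStepA (pvCanon L) u t = pvCanon (L ++ [(t, u)]) := by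
  by_cases h : u ∈ pvDD L
  · have hc : (pvDD L).contains u = true := List.contains_iff_mem.mpr h
    have hcc : (pvCanon L).contains u = true := by rw [pvContains_canon]; exact hc
    apply PySem.Dict.ext
    rw [pvStepA]
    simp only [hcc, if_pos]
    rw [PySem.Dict.items_insert_of_contains (h := hcc), pvGetD_canon, if_pos h]
    show ((pvDD L).map (fun u' => (u', pvVal L u'))).map _ = (pvCanon (L ++ [(t, u)])).items
    rw [List.map_map]
    show _ = (pvDD (L ++ [(t, u)])).map (fun u' => (u', pvVal (L ++ [(t, u)]) u'))
    rw [pvDD_append, if_pos hc]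
    apply List.map_congr_left
    intro u' _
    simp only [Function.comp_def]
    by_cases hu : u' = u
    · subst hu
      simp only [beq_self_eq_true, if_pos, pvVal_append]
      show (u', pvSortL (pvSortL ((L.filter (fun q => q.2 == u')).map (·.1)) ++ [t]))
          = (u', pvSortL ((L.filter (fun q => q.2 == u')).map (·.1) ++ [t]))
      rw [pvSortL_idem_append]
    · simp [hu, pvVal_append]
  · have hc : (pvDD L).contains u = false := by
      simp [h]
    have hcc : (pvCanon L).contains u = false := by rw [pvContains_canon]; exact hc
    apply PySem.Dict.ext
    rw [pvStepA]
    simp only [hcc, Bool.false_eq_true, if_false]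
    rw [PySem.Dict.getD_insert_self, PySem.Dict.insert_insert_self]
    rw [PySem.Dict.items_insert_of_not_contains (h := hcc)]
    show ((pvDD L).map (fun u' => (u', pvVal L u'))) ++ [(u, pvSortL ([] ++ [t]))]
        = (pvDD (L ++ [(t, u)])).map (fun u' => (u', pvVal (L ++ [(t, u)]) u'))
    rw [pvDD_append, if_neg (by simpa using h), List.map_append]
    congr 1
    · apply List.map_congr_left
      intro u' hu'
      have : u' ≠ u := fun he => h (he ▸ hu')
      simp [pvVal_append, this]
    · have hfil : L.filter (fun q => q.2 == u) = [] := by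
        rw [List.filter_eq_nil_iff]
        intro q hq
        simp only [beq_iff_eq]
        exact fun he => h ((pvMem_dd L u).mpr ⟨q, hq, he⟩)
      simp [pvVal, hfil]

theorem pvCanon_foldl (L : List (String × String)) :
    L.foldl (fun d q => pvStepA d q.2 q.1) (PySem.Dict.empty : PySem.Dict String (List String))
      = pvCanon L := by
  induction L using List.reverseRecOn with
  | nil => rfl
  | append_singleton L q ih =>
    rw [List.foldl_append, List.foldl_cons, List.foldl_nil, ih, pvStep_canon]

theorem pvUsersB_eq_dd (items : List (String × List String)) :
    pvUsersB items = pvDD (pvPairs items) := by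
  have h1 : (pvPairs items).map (fun q => q.2)
      = items.flatMap (fun p => p.2.map PySem.Str.lower) := by
    simp [pvPairs, List.map_flatMap, List.map_map, Function.comp_def]
  have h2 : pvUsersB items
      = ((pvPairs items).map (fun q => q.2)).foldl
          (fun acc x => if acc.contains x then acc else acc ++ [x]) [] := by
    rw [pvUsersB, h1]
    rfl
  rw [h2, List.foldl_map]
  rfl

theorem pvGetD_modify_fold (L : List (String × String)) (u : String) :
    ∀ d : PySem.Dict String (List String),
      (L.foldl (fun d q => d.modify q.2 [] (· ++ [q.1])) d).getD u []
        = d.getD u [] ++ (L.filter (fun q => q.2 == u)).map (·.1) := by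
  induction L with
  | nil => intro d; simp
  | cons q L ih =>
    intro d
    rw [List.foldl_cons, ih, PySem.Dict.getD_modify]
    by_cases h : u = q.2
    · simp [h]
    · have h' : (q.2 == u) = false := by simp; exact fun e => h e.symm
      simp [h, h']

theorem pvPairs_pairwise (items : List (String × List String))
    (h : items.Pairwise (fun a b => a.1 ≤ b.1)) :
    (pvPairs items).Pairwise (fun a b : String × String => a.1 ≤ b.1) := by
  induction items with
  | nil => exact List.Pairwise.nil
  | cons x xs ih =>
    rw [pvPairs, List.flatMap_cons, List.pairwise_append]
    refine ⟨?_, ih (List.Pairwise.sublist (List.sublist_cons_self x xs) h), ?_⟩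
    · rw [List.pairwise_map]
      induction x.2 with
      | nil => exact List.Pairwise.nil
      | cons _ _ ih => exact List.Pairwise.cons (fun _ _ => le_refl x.1) ih
    · intro a ha b hb
      rcases List.mem_map.mp ha with ⟨v, _, rfl⟩
      rcases List.mem_flatMap.mp hb with ⟨p, hp, hbp⟩
      rcases List.mem_map.mp hbp with ⟨w, _, rfl⟩
      exact (List.pairwise_cons.mp h).1 p hp

theorem pvVal_eq_sorted_filter (items : List (String × List String)) (u : String) :
    pvVal (pvPairs items) u
      = ((pvPairs (PySem.List.sorted items (fun p => p.1) false)).filter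
          (fun q => q.2 == u)).map (·.1) := by
  apply PySem.List.sorted_id_eq_of_perm_of_pairwise
  · exact ((((PySem.List.sorted_perm items (fun p => p.1) false).flatMap
        (fun _ _ => List.Perm.refl _)).filter _).map _)
  · have hp := pvPairs_pairwise _ (PySem.List.sorted_pairwise items (fun p => p.1))
    have hf := List.Pairwise.filter (fun q : String × String => q.2 == u) hp
    rw [List.pairwise_map]
    exact hf

theorem pvCollectB_flat (items : List (String × List String)) :
    pvCollectB items
      = (pvPairs (PySem.List.sorted items (fun p => p.1) false)).foldl
          (fun d q => d.modify q.2 [] (· ++ [q.1]))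
          (PySem.Dict.empty : PySem.Dict String (List String)) := by
  have h := pvFlatten (σ := PySem.Dict String (List String))
    (fun d u t => d.modify u [] (· ++ [t]))
    (PySem.List.sorted items (fun p => p.1) false) PySem.Dict.empty
  exact h

theorem pvCollectB_getD (items : List (String × List String)) (u : String) :
    (pvCollectB items).getD u []
      = ((pvPairs (PySem.List.sorted items (fun p => p.1) false)).filter
          (fun q => q.2 == u)).map (·.1) := by
  rw [pvCollectB_flat, pvGetD_modify_fold]
  simp

-- ===== VERDICT (by name: the statement is the Claim_ definition above) =====
theorem load_user_tags_dict_py_spec : Claim_equal_load_user_tags_dict_py := by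
  intro tags_content _
  unfold Spec_load_user_tags_dict_py load_user_tags_dict_py load_user_tags_dict_py_alt
  rw [pvFlatten (fun d u t => pvStepA d u t), pvCanon_foldl, pvUsersB_eq_dd]
  show ((pvDD (pvPairs _)).map (fun u => (u, pvVal (pvPairs _) u))) = _
  apply List.map_congr_left
  intro u _
  rw [pvCollectB_getD, pvVal_eq_sorted_filter]
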